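-- pv_equiv track=rewrite | github.com/xxyml/holophage | embedding_pipeline/scripts/extract_prott5_embeddings.py | coverage_weights
-- ===== SOURCE A (Python) =====
-- def coverage_weights(windows: list[tuple[int, int, str]]) -> list[int]:
--     weights: list[int] = []
--     covered_until = 0
--     for start, end, _ in windows:
--         unique = end - max(start, covered_until)
--         unique = max(1, unique)
--         weights.append(unique)
--         covered_until = max(covered_until, end)
--     return weights
-- ===== SOURCE B (Python) =====
-- def coverage_weights(windows: list[tuple[int, int, str]]) -> list[int]:
--     # Divide and conquer: solve(ws, c) returns (weights of ws given incoming
--     # coverage c, the coverage after ws). Correct because the running coverage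
--     # entering the right half is exactly the coverage after the left half.
--     def solve(ws: list[tuple[int, int, str]], c: int) -> tuple[list[int], int]:
--         if not ws:
--             return [], c
--         if len(ws) == 1:
--             start, end, _ = ws[0]
--             return [max(1, end - max(start, c))], max(c, end)
--         m = len(ws) // 2
--         lw, lc = solve(ws[:m], c)
--         rw, rc = solve(ws[m:], lc)
--         return lw + rw, rc
--     return solve(windows, 0)[0]
-- ===== Notes on version B (the rewrite author's own statement) =====
-- stated objective: alternative
-- what changed: Replaces A's single left-to-right accumulator loop by a binary divide-and-conquer recursion that solves each half independently and threads the left half's resulting coverage into the right half.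
import Mathlib
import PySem

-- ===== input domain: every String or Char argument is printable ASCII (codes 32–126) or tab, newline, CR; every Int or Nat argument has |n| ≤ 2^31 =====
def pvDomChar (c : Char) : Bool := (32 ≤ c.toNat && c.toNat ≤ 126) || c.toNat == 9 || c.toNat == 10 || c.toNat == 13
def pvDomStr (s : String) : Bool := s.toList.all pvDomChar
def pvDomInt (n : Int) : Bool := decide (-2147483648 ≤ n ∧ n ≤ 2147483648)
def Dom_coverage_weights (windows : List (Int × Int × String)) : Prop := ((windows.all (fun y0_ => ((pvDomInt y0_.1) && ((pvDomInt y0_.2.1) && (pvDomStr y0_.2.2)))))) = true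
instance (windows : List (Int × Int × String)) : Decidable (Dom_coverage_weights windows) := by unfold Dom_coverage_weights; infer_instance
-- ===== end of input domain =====

-- B replaces A's single accumulator loop by a binary divide-and-conquer recursion threading the left half's coverage into the right half; equal output (objective: alternative).


-- ===== PORT A =====
-- A: one fused loop carrying (weights, covered_until).
def coverage_weights (windows : List (Int × Int × String)) : List Int :=
  (windows.foldl
    (fun (st : List Int × Int) w =>
      let unique := max 1 (w.2.1 - max w.1 st.2)
      (st.1 ++ [unique], max st.2 w.2.1))
    ([], 0)).1

-- ===== PORT B =====
-- B: divide and conquer; solveB ws c = (weights of ws given incoming coverage c, coverage after ws).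
def solveB : List (Int × Int × String) → Int → List Int × Int
  | [], c => ([], c)
  | [w], c => ([max 1 (w.2.1 - max w.1 c)], max c w.2.1)
  | w1 :: w2 :: t, c =>
    let ws := w1 :: w2 :: t
    let m := ws.length / 2
    let l := solveB (ws.take m) c
    let r := solveB (ws.drop m) l.2
    (l.1 ++ r.1, r.2)
termination_by ws _ => ws.length
decreasing_by
  · simp [List.length_take]; omega
  · simp [List.length_drop]; omega

def coverage_weights_alt (windows : List (Int × Int × String)) : List Int :=
  (solveB windows 0).1

-- ===== PRECONDITION & SPEC =====
def Spec_coverage_weights (windows : List (Int × Int × String)) (out : List Int) : Prop := out = coverage_weights_alt windows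
instance (windows : List (Int × Int × String)) (out : List Int) : Decidable (Spec_coverage_weights windows out) := by unfold Spec_coverage_weights; infer_instance

-- ===== CLAIM (what is proved, stated in full; the proofs are below) =====
def Claim_equal_coverage_weights : Prop := ∀ (windows : List (Int × Int × String)), Dom_coverage_weights windows → Spec_coverage_weights windows (coverage_weights windows)

-- ===== LEMMAS AND PROOFS =====
-- Reference shape: the per-window weights starting from running coverage c, and the final coverage.
def covWeights (c : Int) : List (Int × Int × String) → List Int
  | [] => []
  | w :: t => max 1 (w.2.1 - max w.1 c) :: covWeights (max c w.2.1) t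

def covMax (c : Int) : List (Int × Int × String) → Int
  | [] => c
  | w :: t => covMax (max c w.2.1) t

theorem covWeights_append (l r : List (Int × Int × String)) : ∀ (c : Int),
    covWeights c (l ++ r) = covWeights c l ++ covWeights (covMax c l) r := by
  induction l with
  | nil => intro c; simp [covWeights, covMax]
  | cons w t ih => intro c; simp [covWeights, covMax, ih]

theorem covMax_append (l r : List (Int × Int × String)) : ∀ (c : Int),
    covMax c (l ++ r) = covMax (covMax c l) r := by
  induction l with
  | nil => intro c; simp [covMax]
  | cons w t ih => intro c; simp [covMax, ih]

theorem solveB_eq_aux : ∀ (n : Nat) (ws : List (Int × Int × String)), ws.length ≤ n →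
    ∀ (c : Int), solveB ws c = (covWeights c ws, covMax c ws) := by
  intro n
  induction n with
  | zero =>
    intro ws h c
    match ws with
    | [] => simp [solveB, covWeights, covMax]
    | _ :: _ => simp at h
  | succ n ih =>
    intro ws h c
    match ws with
    | [] => simp [solveB, covWeights, covMax]
    | [w] => simp [solveB, covWeights, covMax]
    | w1 :: w2 :: t =>
      rw [solveB]
      simp only [List.length_cons] at h
      rw [ih _ (by simp [List.length_take, List.length_cons]; omega) c]
      rw [ih _ (by simp [List.length_drop, List.length_cons]; omega)]
      have hsplit := List.take_append_drop ((w1 :: w2 :: t).length / 2) (w1 :: w2 :: t)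
      conv_rhs => rw [← hsplit]
      rw [covWeights_append, covMax_append]

theorem solveB_eq (ws : List (Int × Int × String)) (c : Int) :
    solveB ws c = (covWeights c ws, covMax c ws) :=
  solveB_eq_aux ws.length ws le_rfl c

theorem foldA_eq (ws : List (Int × Int × String)) : ∀ (acc : List Int) (c : Int),
    (ws.foldl
      (fun (st : List Int × Int) w =>
        let unique := max 1 (w.2.1 - max w.1 st.2)
        (st.1 ++ [unique], max st.2 w.2.1))
      (acc, c)).1 = acc ++ covWeights c ws := by
  induction ws with
  | nil => intro acc c; simp [covWeights]
  | cons w t ih =>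
    intro acc c
    simp only [List.foldl_cons, covWeights]
    rw [ih]
    simp

-- ===== VERDICT (by name: the statement is the Claim_ definition above) =====
theorem coverage_weights_spec : Claim_equal_coverage_weights := by
  intro ws _
  unfold Spec_coverage_weights coverage_weights coverage_weights_alt
  rw [foldA_eq ws [] 0, solveB_eq]
  simp
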